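-- pv_equiv track=rewrite | github.com/Phantom0110/Programming-Assignment-2-COP4533 | src/cache_compare.py | lru_misses
-- ===== SOURCE A (Python) =====
-- from collections import deque, OrderedDict, defaultdict
--
-- def lru_misses(k, requests):
--
--     cache = OrderedDict()
--     misses = 0
--
--     for item in requests:
--
--         if item in cache:
--             cache.move_to_end(item)
--
--         else:
--             misses += 1
--
--             if len(cache) == k:
--                 cache.popitem(last=False)
--
--             cache[item] = True
--
--     return misses
-- ===== SOURCE B (Python) =====
-- def lru_misses(k, requests):
--     cache = {}          # item -> last-used timestamp
--     clock = 0
--     misses = 0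
--     for item in requests:
--         clock += 1
--         if item in cache:
--             cache[item] = clock
--         else:
--             misses += 1
--             if len(cache) == k:
--                 victim = min(cache, key=cache.get)
--                 del cache[victim]
--             cache[item] = clock
--     return misses
-- ===== Notes on version B (the rewrite author's own statement) =====
-- stated objective: alternative
-- what changed: Replaces the OrderedDict recency queue (move_to_end/popitem) by a plain dict of item->last-used timestamps with an integer clock and a linear min-timestamp scan at eviction time.
-- outside the precondition, e.g. on lru_misses(0, [1]): A raises KeyError, B raises ValueError
import Mathlib
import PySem

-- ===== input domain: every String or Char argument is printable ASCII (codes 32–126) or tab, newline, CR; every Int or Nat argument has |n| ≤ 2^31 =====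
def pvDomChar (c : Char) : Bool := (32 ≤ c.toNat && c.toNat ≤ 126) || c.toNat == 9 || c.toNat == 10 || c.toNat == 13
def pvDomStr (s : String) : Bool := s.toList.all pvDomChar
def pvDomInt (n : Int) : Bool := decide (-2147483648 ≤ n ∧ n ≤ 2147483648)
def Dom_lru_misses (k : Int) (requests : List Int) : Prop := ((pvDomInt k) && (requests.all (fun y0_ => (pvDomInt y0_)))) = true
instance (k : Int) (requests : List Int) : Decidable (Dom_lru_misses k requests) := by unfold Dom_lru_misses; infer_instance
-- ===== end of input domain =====

-- B replaces A's ordered-dict recency queue by an item->timestamp dict with a clock and a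
-- linear min-timestamp scan at eviction (alternative data structure, similar cost).


-- ===== PORT A =====
-- OrderedDict (all values True) ≅ its key list in recency order: front = least recent.
def lruA_step (k : Int) (st : List Int × Int) (item : Int) : List Int × Int :=
  if st.1.contains item then
    (st.1.erase item ++ [item], st.2)                              -- cache.move_to_end(item)
  else
    let c := if (st.1.length : Int) = k then st.1.tail else st.1   -- cache.popitem(last=False); Python raises on empty cache (outside Pre_)
    (c ++ [item], st.2 + 1)

def lru_misses (k : Int) (requests : List Int) : Int :=
  (requests.foldl (lruA_step k) ([], 0)).2

-- ===== PORT B =====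
-- min(cache, key=cache.get): first key attaining the minimum timestamp.
def lruB_min (p : Int × Int) (rest : List (Int × Int)) : Int :=
  (rest.foldl (fun acc q => if q.2 < acc.2 then q else acc) p).1

def lruB_step (k : Int) (st : List (Int × Int) × Int × Int) (item : Int) : List (Int × Int) × Int × Int :=
  let clock := st.2.1 + 1
  if st.1.any (fun p => p.1 == item) then
    (st.1.map (fun p => if p.1 == item then (p.1, clock) else p), clock, st.2.2)
  else
    let d' := if (st.1.length : Int) = k then
        (match st.1 with
         | [] => []                                  -- Python's min over an empty dict raises here (outside Pre_)
         | p :: rest => (p :: rest).eraseP (fun q => q.1 == lruB_min p rest))   -- del cache[victim]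
      else st.1
    (d' ++ [(item, clock)], clock, st.2.2 + 1)

def lru_misses_alt (k : Int) (requests : List Int) : Int :=
  (requests.foldl (lruB_step k) ([], 0, 0)).2.2

-- ===== PRECONDITION & SPEC =====
-- Pre_ excludes k = 0 with a nonempty request list: there the first miss reaches the eviction
-- branch with an empty cache and A raises KeyError (B raises ValueError at min()).
def Pre_lru_misses (k : Int) (requests : List Int) : Prop := k = 0 → requests = []
instance (k : Int) (requests : List Int) : Decidable (Pre_lru_misses k requests) := by unfold Pre_lru_misses; infer_instance
def pvWitness_lru_misses : Int × List Int := (2, [1, 2, 3, 1, 2])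

def Spec_lru_misses (k : Int) (requests : List Int) (out : Int) : Prop := out = lru_misses_alt k requests
instance (k : Int) (requests : List Int) (out : Int) : Decidable (Spec_lru_misses k requests out) := by unfold Spec_lru_misses; infer_instance

-- ===== CLAIM (what is proved, stated in full; the proofs are below) =====
def Claim_equal_lru_misses : Prop := ∀ (k : Int) (requests : List Int), Dom_lru_misses k requests → Pre_lru_misses k requests → Spec_lru_misses k requests (lru_misses k requests)

-- ===== LEMMAS AND PROOFS =====

/-- Invariant: B's dict `d` is a permutation of A's recency list `cache` zipped with
strictly increasing timestamps, all at most the clock. -/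
def LruInv (clock : Int) (cache : List Int) (d : List (Int × Int)) : Prop :=
  ∃ ts : List Int,
    cache.Nodup ∧
    ts.length = cache.length ∧
    List.Pairwise (· < ·) ts ∧
    (∀ t ∈ ts, t ≤ clock) ∧
    d.Perm (cache.zip ts)

theorem foldl_min_stay (l : List (Int × Int)) (a : Int × Int)
    (h : ∀ q ∈ l, ¬ q.2 < a.2) :
    l.foldl (fun acc q => if q.2 < acc.2 then q else acc) a = a := by
  induction l with
  | nil => rfl
  | cons q l ih =>
    simp only [List.foldl_cons]
    rw [if_neg (h q (by simp))]
    exact ih (fun q hq => h q (by simp [hq]))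

theorem foldl_min_eq (l : List (Int × Int)) (a e : Int × Int)
    (he : e ∈ l) (ha : e.2 < a.2)
    (hmin : ∀ q ∈ l, q = e ∨ e.2 < q.2) :
    l.foldl (fun acc q => if q.2 < acc.2 then q else acc) a = e := by
  induction l generalizing a with
  | nil => cases he
  | cons q l ih =>
    simp only [List.foldl_cons]
    by_cases hq : q = e
    · subst hq
      rw [if_pos ha]
      exact foldl_min_stay l q (by
        intro p hp
        rcases hmin p (by simp [hp]) with h | h
        · subst h; omega
        · omega)
    · have hql : e.2 < q.2 := by
        rcases hmin q (by simp) with h | h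
        · exact absurd h hq
        · exact h
      have hel : e ∈ l := by
        rcases List.mem_cons.mp he with h | h
        · exact absurd h.symm hq
        · exact h
      by_cases hlt : q.2 < a.2
      · rw [if_pos hlt]
        exact ih _ hel hql (fun p hp => hmin p (List.mem_cons_of_mem _ hp))
      · rw [if_neg hlt]
        exact ih _ hel ha (fun p hp => hmin p (List.mem_cons_of_mem _ hp))

theorem split_len {α : Type} (ts : List α) (n m : Nat) (h : ts.length = n + (m + 1)) :
    ∃ u1 t u2, ts = u1 ++ t :: u2 ∧ (u1 : List α).length = n ∧ (u2 : List α).length = m := by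
  induction n generalizing ts with
  | zero =>
    cases ts with
    | nil => simp at h
    | cons t u2 => exact ⟨[], t, u2, by simp, rfl, by simpa using h⟩
  | succ n ih =>
    cases ts with
    | nil => simp at h
    | cons a ts' =>
      obtain ⟨u1, t, u2, h1, h2, h3⟩ := ih ts' (by simp at h; omega)
      exact ⟨a :: u1, t, u2, by simp [h1], by simp [h2], h3⟩

theorem keys_perm {cache ts : List Int} {d : List (Int × Int)}
    (hlen : ts.length = cache.length) (hperm : d.Perm (cache.zip ts)) :
    (d.map Prod.fst).Perm cache := by
  have := hperm.map Prod.fst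
  rwa [List.map_fst_zip (by omega)] at this

theorem contains_eq_of_inv {cache ts : List Int} {d : List (Int × Int)}
    (hlen : ts.length = cache.length) (hperm : d.Perm (cache.zip ts)) (item : Int) :
    (d.any (fun p => p.1 == item)) = cache.contains item := by
  have hk := keys_perm hlen hperm
  rw [Bool.eq_iff_iff]
  simp only [List.any_eq_true, List.contains_eq_mem, decide_eq_true_eq, beq_iff_eq]
  constructor
  · rintro ⟨p, hp, hpi⟩
    exact hk.mem_iff.mp (hpi ▸ List.mem_map_of_mem hp)
  · intro h
    obtain ⟨p, hp, hpi⟩ := List.mem_map.mp (hk.mem_iff.mpr h)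
    exact ⟨p, hp, hpi⟩

/-- One request preserves the invariant and keeps the two miss counters equal. -/
theorem step_rel {k clock m : Int} {cache : List Int} {d : List (Int × Int)}
    (hk : k ≠ 0) (item : Int) (hinv : LruInv clock cache d) :
    (lruA_step k (cache, m) item).2 = (lruB_step k (d, clock, m) item).2.2 ∧
    (lruB_step k (d, clock, m) item).2.1 = clock + 1 ∧
    LruInv (clock + 1) (lruA_step k (cache, m) item).1 (lruB_step k (d, clock, m) item).1 := by
  obtain ⟨ts, hnd, hlen, hsort, hbound, hperm⟩ := hinv
  have hcont := contains_eq_of_inv hlen hperm item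
  have hdlen : d.length = cache.length := by
    rw [hperm.length_eq, List.length_zip]; omega
  by_cases hmem : item ∈ cache
  · -- hit
    have hA : cache.contains item = true := by simp [List.contains_eq_mem, hmem]
    simp only [lruA_step, lruB_step, hcont, hA, if_pos]
    refine ⟨by trivial, by trivial, ?_⟩
    obtain ⟨l1, l2, rfl⟩ := List.append_of_mem hmem
    have hnd' : (item :: (l1 ++ l2)).Nodup := List.nodup_middle.mp hnd
    have hitem_notl : item ∉ l1 ++ l2 := (List.nodup_cons.mp hnd').1
    have hitem_notl1 : item ∉ l1 := fun h => hitem_notl (by simp [h])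
    have hitem_notl2 : item ∉ l2 := fun h => hitem_notl (by simp [h])
    obtain ⟨u1, t, u2, rfl, hu1, hu2⟩ :=
      split_len ts l1.length l2.length (by simp at hlen ⊢; omega)
    have hzip : (l1 ++ item :: l2).zip (u1 ++ t :: u2)
        = l1.zip u1 ++ (item, t) :: l2.zip u2 := by
      rw [List.zip_append hu1.symm]; rfl
    have herase : (l1 ++ item :: l2).erase item = l1 ++ l2 := by
      rw [List.erase_append_right _ hitem_notl1, List.erase_cons_head]
    rw [herase]
    have hsub : List.Sublist (u1 ++ u2) (u1 ++ t :: u2) := (List.sublist_cons_self t u2).append_left u1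
    refine ⟨(u1 ++ u2) ++ [clock + 1], ?_, ?_, ?_, ?_, ?_⟩
    · exact (List.perm_append_singleton item (l1 ++ l2)).nodup_iff.mpr hnd'
    · simp at hu1 hu2 ⊢; omega
    · rw [List.pairwise_append]
      refine ⟨List.Pairwise.sublist hsub hsort, by simp, ?_⟩
      intro a ha b hb
      have := hbound a (hsub.mem ha)
      simp at hb; omega
    · intro t' ht'
      rcases List.mem_append.mp ht' with h | h
      · have := hbound t' (hsub.mem h)
        omega
      · simp at h; omega
    · have hmapped : ((l1 ++ item :: l2).zip (u1 ++ t :: u2)).map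
          (fun p => if p.1 == item then (p.1, clock + 1) else p)
          = l1.zip u1 ++ (item, clock + 1) :: l2.zip u2 := by
        rw [hzip]
        simp only [List.map_append, List.map_cons, beq_self_eq_true, if_pos]
        have e1 : (l1.zip u1).map (fun p => if p.1 == item then (p.1, clock + 1) else p)
            = l1.zip u1 := by
          rw [List.map_congr_left (g := id) ?_, List.map_id]
          intro p hp
          obtain ⟨a, b⟩ := p
          have hne : a ≠ item := fun h => hitem_notl1 (h ▸ (List.of_mem_zip hp).1)
          simp [hne]
        have e2 : (l2.zip u2).map (fun p => if p.1 == item then (p.1, clock + 1) else p)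
            = l2.zip u2 := by
          rw [List.map_congr_left (g := id) ?_, List.map_id]
          intro p hp
          obtain ⟨a, b⟩ := p
          have hne : a ≠ item := fun h => hitem_notl2 (h ▸ (List.of_mem_zip hp).1)
          simp [hne]
        rw [e1, e2]
      refine (hperm.map _).trans ?_
      rw [hmapped]
      have hz2 : ((l1 ++ l2) ++ [item]).zip ((u1 ++ u2) ++ [clock + 1])
          = (l1.zip u1 ++ l2.zip u2) ++ [(item, clock + 1)] := by
        rw [List.zip_append (by simp at hu1 hu2 ⊢; omega), List.zip_append hu1.symm]
        rfl
      rw [hz2]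
      exact List.perm_middle.trans (List.perm_append_singleton _ _).symm
  · -- miss
    have hA : cache.contains item = false := by simp [List.contains_eq_mem, hmem]
    simp only [lruA_step, lruB_step, hcont, hA, Bool.false_eq_true, if_false, hdlen]
    by_cases hg : (cache.length : Int) = k
    · -- eviction
      simp only [if_pos hg]
      cases cache with
      | nil => simp at hg; omega
      | cons c0 rest =>
        cases ts with
        | nil => simp at hlen
        | cons t0 ts' =>
          cases d with
          | nil => simp at hdlen
          | cons p drest =>
            refine ⟨by trivial, by trivial, ?_⟩
            show LruInv (clock + 1) ((c0 :: rest).tail ++ [item])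
              (((p :: drest).eraseP (fun q => q.1 == lruB_min p drest)) ++ [(item, clock + 1)])
            have hzc : (c0 :: rest).zip (t0 :: ts') = (c0, t0) :: rest.zip ts' := rfl
            have he_d : (c0, t0) ∈ p :: drest := hperm.mem_iff.mpr (by rw [hzc]; simp)
            have hmin_d : ∀ q ∈ p :: drest, q = (c0, t0) ∨ t0 < q.2 := by
              intro q hq
              have := hperm.mem_iff.mp hq
              rw [hzc] at this
              rcases List.mem_cons.mp this with h | h
              · exact Or.inl h
              · right
                obtain ⟨a, b⟩ := q
                exact List.rel_of_pairwise_cons hsort (List.of_mem_zip h).2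
            have hv : lruB_min p drest = c0 := by
              unfold lruB_min
              by_cases hpe : p = (c0, t0)
              · subst hpe
                rw [foldl_min_stay]
                intro q hq
                rcases hmin_d q (List.mem_cons_of_mem _ hq) with h | h
                · subst h; omega
                · omega
              · have hel : (c0, t0) ∈ drest := by
                  rcases List.mem_cons.mp he_d with h | h
                  · exact absurd h.symm hpe
                  · exact h
                have hpa : t0 < p.2 := by
                  rcases hmin_d p (by simp) with h | h
                  · exact absurd h hpe
                  · exact h
                rw [foldl_min_eq drest p (c0, t0) hel hpa
                  (fun q hq => hmin_d q (List.mem_cons_of_mem _ hq))]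
            rw [hv]
            have hknd : ((p :: drest).map Prod.fst).Nodup :=
              (keys_perm hlen hperm).nodup_iff.mpr hnd
            obtain ⟨d1, d2, hd⟩ := List.append_of_mem he_d
            have hc0_not : c0 ∉ d1.map Prod.fst ++ d2.map Prod.fst := by
              have := hknd
              rw [hd] at this
              simp only [List.map_append, List.map_cons] at this
              exact (List.nodup_cons.mp (List.nodup_middle.mp this)).1
            have herase : (p :: drest).eraseP (fun q => q.1 == c0) = d1 ++ d2 := by
              rw [hd, List.eraseP_append_right _ ?_, List.eraseP_cons_of_pos (by simp)]
              intro b hb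
              have : b.1 ∈ d1.map Prod.fst := List.mem_map_of_mem hb
              have hne : b.1 ≠ c0 := fun h => hc0_not (by simp [← h, this])
              simp [hne]
            rw [herase]
            have hperm2 : (d1 ++ d2).Perm (rest.zip ts') := by
              have h1 : (p :: drest).Perm ((c0, t0) :: (d1 ++ d2)) := by
                rw [hd]; exact List.perm_middle
              have h2 : ((c0, t0) :: (d1 ++ d2)).Perm ((c0, t0) :: rest.zip ts') :=
                h1.symm.trans (hperm.trans (by rw [hzc]))
              exact h2.cons_inv
            have hndc := List.nodup_cons.mp hnd
            refine ⟨ts' ++ [clock + 1], ?_, ?_, ?_, ?_, ?_⟩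
            · refine (List.perm_append_singleton item rest).nodup_iff.mpr ?_
              exact List.nodup_cons.mpr ⟨fun h => hmem (List.mem_cons_of_mem _ h), hndc.2⟩
            · simp at hlen ⊢; omega
            · rw [List.pairwise_append]
              refine ⟨(List.pairwise_cons.mp hsort).2, by simp, ?_⟩
              intro a ha b hb
              have := hbound a (List.mem_cons_of_mem _ ha)
              simp at hb; omega
            · intro t' ht'
              rcases List.mem_append.mp ht' with h | h
              · have := hbound t' (List.mem_cons_of_mem _ h)
                omega
              · simp at h; omega
            · have hz3 : (rest ++ [item]).zip (ts' ++ [clock + 1])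
                  = rest.zip ts' ++ [(item, clock + 1)] := by
                rw [List.zip_append (by simp at hlen ⊢; omega)]
                rfl
              rw [List.tail_cons, hz3]
              exact hperm2.append_right _
    · -- no eviction
      simp only [if_neg hg]
      refine ⟨by trivial, by trivial, ?_⟩
      refine ⟨ts ++ [clock + 1], ?_, ?_, ?_, ?_, ?_⟩
      · exact (List.perm_append_singleton item cache).nodup_iff.mpr
          (List.nodup_cons.mpr ⟨hmem, hnd⟩)
      · simp at hlen ⊢; omega
      · rw [List.pairwise_append]
        refine ⟨hsort, by simp, ?_⟩
        intro a ha b hb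
        have := hbound a ha
        simp at hb; omega
      · intro t' ht'
        rcases List.mem_append.mp ht' with h | h
        · have := hbound t' h
          omega
        · simp at h; omega
      · have hz4 : (cache ++ [item]).zip (ts ++ [clock + 1])
            = cache.zip ts ++ [(item, clock + 1)] := by
          rw [List.zip_append hlen.symm]
          rfl
        rw [hz4]
        exact hperm.append_right _

theorem fold_rel (k : Int) (hk : k ≠ 0) (requests : List Int) :
    ∀ (cache : List Int) (d : List (Int × Int)) (clock m : Int), LruInv clock cache d →
    (requests.foldl (lruA_step k) (cache, m)).2
      = (requests.foldl (lruB_step k) (d, clock, m)).2.2 := by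
  induction requests with
  | nil => intro _ _ _ _ _; rfl
  | cons item rs ih =>
    intro cache d clock m hinv
    obtain ⟨hm, hc, hinv'⟩ := step_rel (m := m) hk item hinv
    simp only [List.foldl_cons]
    have hB : lruB_step k (d, clock, m) item
        = ((lruB_step k (d, clock, m) item).1, clock + 1, (lruA_step k (cache, m) item).2) := by
      rw [hm, ← hc]
    have hA : lruA_step k (cache, m) item
        = ((lruA_step k (cache, m) item).1, (lruA_step k (cache, m) item).2) := rfl
    rw [hB, hA]
    exact ih _ _ _ _ hinv'

-- ===== VERDICT (by name: the statement is the Claim_ definition above) =====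
theorem lru_misses_spec : Claim_equal_lru_misses := by
  intro k requests _ hpre
  unfold Spec_lru_misses
  by_cases hk : k = 0
  · rw [hpre hk]; rfl
  · exact fold_rel k hk requests [] [] 0 0
      ⟨[], by simp, by simp, by simp, by simp, List.Perm.refl _⟩
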